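-- pv_equiv track=rewrite | github.com/google-research/language | language/compgen/nqg/tasks/spider/tmcd_utils.py | _replace_nonterminal
-- ===== SOURCE A (Python) =====
-- _PLACEHOLDER = "___"
--
-- def _replace_nonterminal(node_1_string, node_1_idx, node_2_string):
--   """Replace corresponding non-terminal in node_2_string with node_1_string."""
--   non_terminals = 0
--   new_tokens = []
--   for token in node_2_string.split():
--     if token == _PLACEHOLDER:
--       if non_terminals == node_1_idx:
--         new_tokens.append(node_1_string)
--       else:
--         new_tokens.append(token)
--       non_terminals += 1
--     else:
--       new_tokens.append(token)
--   return " ".join(new_tokens)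
-- ===== SOURCE B (Python) =====
-- _PLACEHOLDER = "___"
--
-- def _replace_nonterminal(node_1_string, node_1_idx, node_2_string):
--   """Replace corresponding non-terminal in node_2_string with node_1_string."""
--   tokens = node_2_string.split()
--   positions = [i for i, t in enumerate(tokens) if t == _PLACEHOLDER]
--   if 0 <= node_1_idx < len(positions):
--     tokens[positions[node_1_idx]] = node_1_string
--   return " ".join(tokens)
-- ===== Notes on version B (the rewrite author's own statement) =====
-- stated objective: alternative
-- what changed: Replaces A's single pass with a running placeholder counter and conditional appends by a two-phase index-table structure: collect all placeholder positions once, then directly assign at positions[node_1_idx] if it is in range.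
import Mathlib
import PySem

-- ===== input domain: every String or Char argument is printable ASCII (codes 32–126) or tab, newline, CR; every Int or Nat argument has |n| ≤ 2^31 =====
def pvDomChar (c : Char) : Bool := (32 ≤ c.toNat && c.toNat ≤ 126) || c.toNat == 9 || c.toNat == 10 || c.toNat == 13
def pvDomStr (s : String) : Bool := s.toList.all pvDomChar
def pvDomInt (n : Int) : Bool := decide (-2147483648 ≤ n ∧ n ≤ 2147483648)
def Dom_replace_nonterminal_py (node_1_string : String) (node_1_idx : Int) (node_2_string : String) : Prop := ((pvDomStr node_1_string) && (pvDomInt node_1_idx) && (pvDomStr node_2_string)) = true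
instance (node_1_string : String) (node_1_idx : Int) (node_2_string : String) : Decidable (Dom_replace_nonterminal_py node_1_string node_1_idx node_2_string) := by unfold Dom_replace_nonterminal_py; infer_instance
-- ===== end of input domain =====

-- B replaces A's single-pass running-counter match by an index table of placeholder positions plus
-- one direct assignment (alternative decomposition, same cost); return value only, no mutation is observable.

-- ===== PORT A =====
-- Literal port of A: one fold over the tokens carrying (non_terminals, new_tokens).
def replace_nonterminal_py (node_1_string : String) (node_1_idx : Int) (node_2_string : String) : String :=
  let r := (PySem.Str.split₀ node_2_string).foldl
    (fun (st : Int × List String) token =>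
      if token == "___" then
        if st.1 == node_1_idx then (st.1 + 1, st.2 ++ [node_1_string])
        else (st.1 + 1, st.2 ++ [token])
      else (st.1, st.2 ++ [token]))
    (0, [])
  PySem.Str.join " " r.2

-- ===== PORT B =====
-- Literal port of B: index table of placeholder positions, then one direct assignment if in range.
def replace_nonterminal_py_alt (node_1_string : String) (node_1_idx : Int) (node_2_string : String) : String :=
  let tokens := PySem.Str.split₀ node_2_string
  let positions := ((PySem.List.enumerate tokens).filter (fun p => p.2 == "___")).map (fun p => p.1)
  let tokens :=
    if 0 ≤ node_1_idx ∧ node_1_idx < (positions.length : Int) then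
      tokens.set (positions.getD node_1_idx.toNat 0).toNat node_1_string
    else tokens
  PySem.Str.join " " tokens

-- ===== PRECONDITION & SPEC =====
def Spec_replace_nonterminal_py (node_1_string : String) (node_1_idx : Int) (node_2_string : String) (out : String) : Prop := out = replace_nonterminal_py_alt node_1_string node_1_idx node_2_string
instance (node_1_string : String) (node_1_idx : Int) (node_2_string : String) (out : String) : Decidable (Spec_replace_nonterminal_py node_1_string node_1_idx node_2_string out) := by unfold Spec_replace_nonterminal_py; infer_instance

-- ===== CLAIM (what is proved, stated in full; the proofs are below) =====
def Claim_equal_replace_nonterminal_py : Prop := ∀ (node_1_string : String) (node_1_idx : Int) (node_2_string : String), Dom_replace_nonterminal_py node_1_string node_1_idx node_2_string → Spec_replace_nonterminal_py node_1_string node_1_idx node_2_string (replace_nonterminal_py node_1_string node_1_idx node_2_string)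

-- ===== LEMMAS AND PROOFS =====

-- Reference function: replace the j-th placeholder (counting from j down to 0) in a token list.
def pvRepl (n1 : String) (j : Int) : List String → List String
  | [] => []
  | t :: ts => if t = "___" then (if j = 0 then n1 else t) :: pvRepl n1 (j - 1) ts
               else t :: pvRepl n1 j ts

-- Placeholder positions of a token list, as integers.
def pvPosI : List String → List Int
  | [] => []
  | t :: ts => if t = "___" then 0 :: (pvPosI ts).map (· + 1) else (pvPosI ts).map (· + 1)

theorem pvPosI_nonneg (ts : List String) : ∀ x ∈ pvPosI ts, 0 ≤ x := by
  induction ts with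
  | nil => simp [pvPosI]
  | cons t ts ih =>
    intro x hx
    simp only [pvPosI] at hx
    split_ifs at hx with h1 <;> simp only [List.mem_cons, List.mem_map] at hx
    · rcases hx with rfl | ⟨y, hy, rfl⟩
      · omega
      · have := ih y hy; omega
    · obtain ⟨y, hy, rfl⟩ := hx
      have := ih y hy; omega

theorem pvRepl_neg (n1 : String) (j : Int) (ts : List String) (h : j < 0) :
    pvRepl n1 j ts = ts := by
  induction ts generalizing j with
  | nil => rfl
  | cons t ts ih =>
    simp only [pvRepl]
    split_ifs with h1 h2
    · omega
    · rw [ih _ (by omega)]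
    · rw [ih _ h]

theorem pvRepl_oob (n1 : String) (j : Int) (ts : List String)
    (h : ((pvPosI ts).length : Int) ≤ j) : pvRepl n1 j ts = ts := by
  induction ts generalizing j with
  | nil => rfl
  | cons t ts ih =>
    simp only [pvRepl, pvPosI] at *
    split_ifs at h ⊢ with h1 h2
    · simp only [List.length_cons, List.length_map] at h; omega
    · simp only [List.length_cons, List.length_map] at h
      rw [ih _ (by omega)]
    · simp only [List.length_map] at h
      rw [ih _ h]

-- A's fold equals the reference replacement.
theorem pvA_loop (n1 : String) (idx : Int) (ts : List String) (c : Int) (acc : List String) :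
    ((ts.foldl
      (fun (st : Int × List String) token =>
        if token == "___" then
          if st.1 == idx then (st.1 + 1, st.2 ++ [n1])
          else (st.1 + 1, st.2 ++ [token])
        else (st.1, st.2 ++ [token]))
      (c, acc)).2) = acc ++ pvRepl n1 (idx - c) ts := by
  induction ts generalizing c acc with
  | nil => simp [pvRepl]
  | cons t ts ih =>
    simp only [List.foldl_cons, pvRepl]
    by_cases h1 : t = "___"
    · by_cases h2 : c = idx
      · simp only [h1, h2, beq_self_eq_true, if_true]
        rw [ih]
        have e : idx - (idx + 1) = idx - idx - 1 := by omega
        simp [e, List.append_assoc]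
      · have hb : (c == idx) = false := by simp [h2]
        simp only [h1, beq_self_eq_true, if_true, hb, Bool.false_eq_true, if_false]
        rw [ih]
        have hz : ¬ (idx - c = 0) := by omega
        have e : idx - (c + 1) = idx - c - 1 := by omega
        simp [hz, e, List.append_assoc]
    · have hb : (t == "___") = false := by simp [h1]
      simp only [hb, Bool.false_eq_true, if_false, if_neg h1]
      rw [ih]
      simp [List.append_assoc]

-- B's enumerate-filter position table equals pvPosI, shifted by the start.
theorem pvPos_enum (ts : List String) (s : Int) :
    (((PySem.List.enumerate ts s).filter (fun p => p.2 == "___")).map (fun p => p.1))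
      = (pvPosI ts).map (· + s) := by
  induction ts generalizing s with
  | nil => rfl
  | cons t ts ih =>
    simp only [PySem.List.enumerate_cons, pvPosI]
    by_cases h1 : t = "___"
    · simp only [h1, List.filter_cons, beq_self_eq_true, if_true, List.map_cons]
      rw [ih]
      simp only [List.map_map]
      congr 1
      · omega
      · apply List.map_congr_left; intro k _; simp; omega
    · have hb : ((s, t).2 == "___") = false := by simp [h1]
      rw [List.filter_cons, hb]
      simp only [Bool.false_eq_true, if_false, if_neg h1]
      rw [ih, List.map_map]
      apply List.map_congr_left; intro k _; simp; omega

-- getD through the (+1) shift of an in-bounds position list.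
theorem pvGetD_shift (l : List Int) (k : Nat) (hk : k < l.length) :
    (l.map (· + 1)).getD k 0 = l.getD k 0 + 1 := by
  rw [List.getD_eq_getElem _ _ (by simpa using hk), List.getD_eq_getElem _ _ hk]
  simp

-- B's guarded direct assignment equals the reference replacement.
theorem pvB_set (n1 : String) (j : Int) (ts : List String) :
    (if 0 ≤ j ∧ j < ((pvPosI ts).length : Int) then
        ts.set ((pvPosI ts).getD j.toNat 0).toNat n1
      else ts) = pvRepl n1 j ts := by
  induction ts generalizing j with
  | nil =>
    rw [if_neg (by simp [pvPosI])]; rfl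
  | cons t ts ih =>
    by_cases h1 : t = "___"
    · simp only [pvPosI, pvRepl, if_pos h1]
      by_cases hj0 : j = 0
      · subst hj0
        rw [if_pos (by simp)]
        simp [pvRepl_neg n1 (-1) ts (by omega)]
      · by_cases hjneg : j < 0
        · rw [if_neg (by omega), if_neg hj0, pvRepl_neg n1 (j - 1) ts (by omega)]
        · have hj1 : 1 ≤ j := by omega
          by_cases hin : j < ((pvPosI ts).length : Int) + 1
          · rw [if_pos (by simp; constructor <;> omega)]
            have hlt : j.toNat - 1 < (pvPosI ts).length := by omega
            have hpos : j.toNat = (j.toNat - 1) + 1 := by omega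
            have hgd : ((0 : Int) :: (pvPosI ts).map (· + 1)).getD j.toNat 0
                = (pvPosI ts).getD (j.toNat - 1) 0 + 1 := by
              conv_lhs => rw [hpos]
              rw [List.getD_cons_succ, pvGetD_shift _ _ hlt]
            have hnn : 0 ≤ (pvPosI ts).getD (j.toNat - 1) 0 := by
              rw [List.getD_eq_getElem _ _ hlt]
              exact pvPosI_nonneg ts _ (List.getElem_mem hlt)
            have htn : ((pvPosI ts).getD (j.toNat - 1) 0 + 1).toNat
                = ((pvPosI ts).getD (j.toNat - 1) 0).toNat + 1 := by omega
            rw [hgd, htn, List.set_cons_succ, if_neg hj0]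
            congr 1
            rw [← ih (j - 1), if_pos (by constructor <;> omega)]
            have hidx : (j - 1).toNat = j.toNat - 1 := by omega
            rw [hidx]
          · rw [if_neg (by simp; intro _; omega), if_neg hj0,
                pvRepl_oob n1 (j - 1) ts (by simp at hin ⊢; omega)]
    · simp only [pvPosI, pvRepl, if_neg h1]
      by_cases hin : 0 ≤ j ∧ j < ((pvPosI ts).length : Int)
      · rw [if_pos (by simp; omega)]
        have hlt : j.toNat < (pvPosI ts).length := by omega
        have hgd : ((pvPosI ts).map (· + 1)).getD j.toNat 0
            = (pvPosI ts).getD j.toNat 0 + 1 := pvGetD_shift _ _ hlt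
        have hnn : 0 ≤ (pvPosI ts).getD j.toNat 0 := by
          rw [List.getD_eq_getElem _ _ hlt]
          exact pvPosI_nonneg ts _ (List.getElem_mem hlt)
        have htn : ((pvPosI ts).getD j.toNat 0 + 1).toNat
            = ((pvPosI ts).getD j.toNat 0).toNat + 1 := by omega
        rw [hgd, htn, List.set_cons_succ]
        congr 1
        rw [← ih j, if_pos hin]
      · rw [if_neg (by simp at hin ⊢; intro h; omega)]
        rw [← ih j, if_neg (by simpa using hin)]

-- ===== VERDICT (by name: the statement is the Claim_ definition above) =====
theorem replace_nonterminal_py_spec : Claim_equal_replace_nonterminal_py := by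
  intro n1 idx n2 _
  unfold Spec_replace_nonterminal_py replace_nonterminal_py replace_nonterminal_py_alt
  simp only
  congr 1
  rw [pvA_loop, pvPos_enum]
  simp only [List.nil_append, Int.sub_zero]
  have h0 : (pvPosI (PySem.Str.split₀ n2)).map (· + (0 : Int))
      = pvPosI (PySem.Str.split₀ n2) := by
    simp
  rw [h0, pvB_set]
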